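-- pv_equiv track=rewrite | github.com/shivamJerry2108064/PYTHON_IMP_Q | MOCK/SET1/SET1.py | is_all_same_word_twice
-- ===== SOURCE A (Python) =====
-- def is_all_same_word_twice(strings: list) -> bool:
--     '''
--     Checks if all strings follow the format where
--     the same word is repeated exactly twice with a hyphen in-between them.
--
--     Args:
--         strings (list): A list of strings to be checked.
--
--     Returns:
--         bool: True if all strings are of the given format, otherwise False.
--     '''
--     for el in strings:
--         mid = len(el) // 2
--         data = el.split("-")
--
--         if('-' not in el):
--             return False
--
--         if(el == '-'):
--             return False
--
--         if not((len(data) == 2) and (data[0] == data[1]) and (el[mid] == '-')):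
--             return False
--     return True
-- ===== SOURCE B (Python) =====
-- def is_all_same_word_twice(strings: list) -> bool:
--     '''Same check, but compares the two halves of each string directly by
--     slicing around the middle hyphen instead of building a split list.'''
--     def ok(el):
--         mid = len(el) // 2
--         half = el[:mid]
--         return mid > 0 and el[mid] == '-' and '-' not in half and half == el[mid + 1:]
--     return all(ok(el) for el in strings)
-- ===== Notes on version B (the rewrite author's own statement) =====
-- stated objective: simpler
-- what changed: Per element, B drops the split('-')-into-list-and-compare-parts test and instead checks directly that the middle character is a hyphen and that the hyphen-free first half equals the slice after the middle, folding the whole loop into all().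
import Mathlib
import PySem

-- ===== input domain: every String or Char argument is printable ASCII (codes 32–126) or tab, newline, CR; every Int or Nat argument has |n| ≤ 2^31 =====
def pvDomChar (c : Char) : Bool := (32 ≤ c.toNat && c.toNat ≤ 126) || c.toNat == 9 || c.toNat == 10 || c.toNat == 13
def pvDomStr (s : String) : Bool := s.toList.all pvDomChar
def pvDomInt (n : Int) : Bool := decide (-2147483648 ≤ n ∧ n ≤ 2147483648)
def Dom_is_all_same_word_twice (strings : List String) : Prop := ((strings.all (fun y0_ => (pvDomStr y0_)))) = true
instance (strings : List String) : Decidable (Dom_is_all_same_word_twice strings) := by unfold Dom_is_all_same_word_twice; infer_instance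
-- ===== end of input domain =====

-- B replaces A's split-into-list-and-compare test by a direct slice comparison of the
-- two halves around the middle character (objective: simpler); same return value everywhere.

-- ===== PORT A =====
def is_all_same_word_twice : List String → Bool
  | [] => true
  | el :: rest =>
    let mid := PySem.Int.floordiv (PySem.Str.len el) 2
    -- split? is none only for an empty separator; the separator here is the literal "-"
    let data := (PySem.Str.split? el "-").getD []
    if !(PySem.Str.isIn "-" el) then false
    else if el == "-" then false
    else if !(decide (data.length = 2) &&
              (PySem.List.pyGet? data 0 == PySem.List.pyGet? data 1) &&
              (PySem.Str.pyGet? el mid == some '-')) then false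
    else is_all_same_word_twice rest

-- ===== PORT B =====
def pvOkTwice (el : String) : Bool :=
  let mid := PySem.Int.floordiv (PySem.Str.len el) 2
  let half := PySem.Str.slice el none (some mid)
  decide (0 < mid) && (PySem.Str.pyGet? el mid == some '-') &&
    !(PySem.Str.isIn "-" half) && (half == PySem.Str.slice el (some (mid + 1)) none)

def is_all_same_word_twice_alt (strings : List String) : Bool := strings.all pvOkTwice

-- ===== PRECONDITION & SPEC =====
def Spec_is_all_same_word_twice (strings : List String) (out : Bool) : Prop := out = is_all_same_word_twice_alt strings
instance (strings : List String) (out : Bool) : Decidable (Spec_is_all_same_word_twice strings out) := by unfold Spec_is_all_same_word_twice; infer_instance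

-- ===== CLAIM (what is proved, stated in full; the proofs are below) =====
def Claim_equal_is_all_same_word_twice : Prop := ∀ (strings : List String), Dom_is_all_same_word_twice strings → Spec_is_all_same_word_twice strings (is_all_same_word_twice strings)

-- ===== LEMMAS AND PROOFS =====

-- the canonical shape: a nonempty hyphen-free word, a hyphen, the same word again
def pvShape (cs : List Char) : Prop := ∃ a : List Char, a ≠ [] ∧ '-' ∉ a ∧ cs = a ++ '-' :: a

-- A's per-element test, factored out of the loop
def pvCheckA (el : String) : Bool :=
  let mid := PySem.Int.floordiv (PySem.Str.len el) 2
  let data := (PySem.Str.split? el "-").getD []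
  if !(PySem.Str.isIn "-" el) then false
  else if el == "-" then false
  else if !(decide (data.length = 2) &&
            (PySem.List.pyGet? data 0 == PySem.List.pyGet? data 1) &&
            (PySem.Str.pyGet? el mid == some '-')) then false
  else true

theorem pv_floordiv_two (n : Nat) : PySem.Int.floordiv (n : Int) 2 = ((n / 2 : Nat) : Int) := by
  rw [PySem.Int.floordiv, Int.fdiv_eq_ediv]
  omega

theorem pv_stepA (el : String) (rest : List String) :
    is_all_same_word_twice (el :: rest) = (pvCheckA el && is_all_same_word_twice rest) := by
  simp only [is_all_same_word_twice, pvCheckA]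
  split <;> [rfl; skip]
  split <;> [rfl; skip]
  split <;> simp

theorem pv_singleton_infix_iff (c : Char) (l : List Char) : [c] <:+: l ↔ c ∈ l := by
  constructor
  · intro h; exact (List.singleton_sublist).1 h.sublist
  · intro h
    obtain ⟨s, t, rfl⟩ := List.append_of_mem h
    exact ⟨s, t, by simp⟩

theorem pv_go_eq (l : List Char) : ∀ (fuel : Nat) (cur : List Char) (acc : List (List Char)),
    l.length ≤ fuel →
    PySem.Chars.splitOn.go ['-'] fuel l cur acc
      = acc.reverse ++ (List.splitOnP (· == '-') l).modifyHead (cur.reverse ++ ·) := by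
  induction l with
  | nil =>
      intro fuel cur acc _
      cases fuel <;> simp [PySem.Chars.splitOn.go, List.splitOnP_nil]
  | cons c rest ih =>
      intro fuel cur acc hf
      cases fuel with
      | zero => simp at hf
      | succ f =>
          simp only [PySem.Chars.splitOn.go, List.splitOnP_cons]
          by_cases hc : c = '-'
          · subst hc
            simp only [List.isPrefixOf, beq_self_eq_true, Bool.true_and, if_pos]
            show PySem.Chars.splitOn.go ['-'] f (List.drop ['-'].length ('-' :: rest)) [] (cur.reverse :: acc) = _
            simp only [List.length_cons, List.length_nil, Nat.zero_add, List.drop_succ_cons, List.drop_zero]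
            rw [ih f [] (cur.reverse :: acc) (by simpa using hf)]
            obtain ⟨h, t, hht⟩ := List.exists_cons_of_ne_nil (List.splitOnP_ne_nil (· == '-') rest)
            simp [hht]
          · have hpre : ['-'].isPrefixOf (c :: rest) = false := by
              simp [List.isPrefixOf]; exact fun h => hc (by simpa using h.symm)
            rw [if_neg (by simp [hpre])]
            rw [ih f (c :: cur) acc (by simpa using hf)]
            obtain ⟨h, t, hht⟩ := List.exists_cons_of_ne_nil (List.splitOnP_ne_nil (· == '-') rest)
            simp [hht, hc]

theorem pv_splitOn_eq (l : List Char) :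
    PySem.Chars.splitOn l ['-'] = List.splitOnP (· == '-') l := by
  rw [PySem.Chars.splitOn, pv_go_eq l (l.length + 1) [] [] (by omega)]
  obtain ⟨h, t, hht⟩ := List.exists_cons_of_ne_nil (List.splitOnP_ne_nil (· == '-') l)
  simp [hht]

theorem pv_splitOnP_single_iff (l a : List Char) :
    List.splitOnP (· == '-') l = [a] ↔ l = a ∧ '-' ∉ a := by
  induction l generalizing a with
  | nil =>
      rw [List.splitOnP_nil]
      constructor
      · intro h; injection h with h1; exact ⟨h1.symm ▸ rfl, by simp [← h1]⟩
      · rintro ⟨rfl, _⟩; rfl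
  | cons c rest ih =>
      rw [List.splitOnP_cons]
      by_cases hc : c = '-'
      · subst hc
        rw [if_pos (by simp)]
        constructor
        · intro heq
          injection heq with _ h2
          exact absurd h2 (List.splitOnP_ne_nil _ _)
        · rintro ⟨rfl, hna⟩
          exact absurd (List.mem_cons_self ..) hna
      · rw [if_neg (by simp [hc])]
        obtain ⟨h, t, hht⟩ := List.exists_cons_of_ne_nil (List.splitOnP_ne_nil (· == '-') rest)
        rw [hht, List.modifyHead_cons]
        constructor
        · intro heq
          injection heq with h1 h2
          subst h2
          obtain ⟨he, hnr⟩ := (ih h).1 hht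
          refine ⟨by rw [← h1, he], ?_⟩
          rw [← h1]
          simp only [List.mem_cons, not_or]
          exact ⟨fun e => hc e.symm, he ▸ hnr⟩
        · rintro ⟨rfl, hna⟩
          simp only [List.mem_cons, not_or] at hna
          have h2 : List.splitOnP (· == '-') rest = [rest] := (ih rest).2 ⟨rfl, hna.2⟩
          rw [hht] at h2
          injection h2 with e1 e2
          rw [e1, e2]

theorem pv_splitOnP_pair_iff (l a b : List Char) :
    List.splitOnP (· == '-') l = [a, b] ↔ l = a ++ '-' :: b ∧ '-' ∉ a ∧ '-' ∉ b := by
  induction l generalizing a with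
  | nil =>
      rw [List.splitOnP_nil]
      constructor
      · intro h; exact absurd (congrArg List.length h) (by simp)
      · rintro ⟨h, -, -⟩
        exact absurd (congrArg List.length h) (by simp)
  | cons c rest ih =>
      rw [List.splitOnP_cons]
      by_cases hc : c = '-'
      · subst hc
        rw [if_pos (by simp)]
        constructor
        · intro heq
          injection heq with h1 h2
          obtain ⟨he, hnb⟩ := (pv_splitOnP_single_iff rest b).1 h2
          exact ⟨by rw [← h1, he, List.nil_append], by simp [← h1], hnb⟩
        · rintro ⟨heq, hna, hnb⟩
          cases a with
          | nil =>
              injection heq with _ h2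
              rw [(pv_splitOnP_single_iff rest b).2 ⟨h2, hnb⟩]
          | cons x a' =>
              injection heq with h1 _
              exact absurd (h1 ▸ List.mem_cons_self ..) hna
      · rw [if_neg (by simp [hc])]
        obtain ⟨h, t, hht⟩ := List.exists_cons_of_ne_nil (List.splitOnP_ne_nil (· == '-') rest)
        rw [hht, List.modifyHead_cons]
        constructor
        · intro heq
          injection heq with h1 h2
          rw [h2] at hht
          obtain ⟨he, hnh, hnb⟩ := (ih h).1 hht
          refine ⟨by rw [← h1, he]; rfl, ?_, hnb⟩
          rw [← h1]
          simp only [List.mem_cons, not_or]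
          exact ⟨fun e => hc e.symm, hnh⟩
        · rintro ⟨heq, hna, hnb⟩
          cases a with
          | nil =>
              injection heq with h1 _
              exact absurd h1 hc
          | cons x a' =>
              injection heq with h1 h2
              simp only [List.mem_cons, not_or] at hna
              have h3 : List.splitOnP (· == '-') rest = [a', b] := (ih a').2 ⟨h2, hna.2, hnb⟩
              rw [hht] at h3
              injection h3 with e1 e2
              rw [e1, e2, h1]

theorem pv_struct (a : List Char) :
    (a ++ '-' :: a).length / 2 = a.length ∧
    (a ++ '-' :: a)[a.length]? = some '-' ∧
    (a ++ '-' :: a).take a.length = a ∧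
    (a ++ '-' :: a).drop (a.length + 1) = a := by
  refine ⟨by simp; omega, ?_, ?_, ?_⟩
  · rw [List.getElem?_append_right (Nat.le_refl _)]
    simp
  · simp
  · have : a ++ '-' :: a = (a ++ ['-']) ++ a := by simp
    rw [this]
    simp

theorem pv_shape_iff (cs : List Char) :
    pvShape cs ↔ (0 < cs.length / 2 ∧ cs[cs.length / 2]? = some '-' ∧
      '-' ∉ cs.take (cs.length / 2) ∧ cs.take (cs.length / 2) = cs.drop (cs.length / 2 + 1)) := by
  constructor
  · rintro ⟨a, hne, hna, rfl⟩
    obtain ⟨h1, h2, h3, h4⟩ := pv_struct a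
    rw [h1, h2, h3, h4]
    exact ⟨by cases a with | nil => exact absurd rfl hne | cons _ _ => simp, rfl, hna, rfl⟩
  · rintro ⟨hm, hget, hnin, heq⟩
    have hlt : cs.length / 2 < cs.length := (List.getElem?_eq_some_iff.1 hget).1
    refine ⟨cs.take (cs.length / 2), ?_, hnin, ?_⟩
    · intro h
      have := congrArg List.length h
      simp [Nat.min_eq_left (Nat.le_of_lt hlt)] at this
      omega
    · conv_lhs => rw [← List.take_append_drop (cs.length / 2) cs]
      rw [List.drop_eq_getElem_cons hlt]
      have hv : cs[cs.length / 2] = '-' := by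
        have := List.getElem?_eq_some_iff.1 hget
        obtain ⟨_, hv⟩ := this
        exact hv
      rw [hv, ← heq]

theorem pv_B_iff (el : String) : pvOkTwice el = true ↔ pvShape el.toList := by
  rw [pv_shape_iff]
  unfold pvOkTwice
  rw [PySem.Str.len_eq, pv_floordiv_two]
  have hhalf : (PySem.Str.slice el none (some ((el.toList.length / 2 : Nat) : Int))).toList
      = el.toList.take (el.toList.length / 2) := by
    rw [PySem.Str.toList_slice, PySem.Chars.slice_eq_listSlice,
      PySem.List.slice_to _ (by positivity)]
    simp
    omega
  have hsec : (PySem.Str.slice el (some (((el.toList.length / 2 : Nat) : Int) + 1)) none).toList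
      = el.toList.drop (el.toList.length / 2 + 1) := by
    rw [PySem.Str.toList_slice, PySem.Chars.slice_eq_listSlice]
    have h1 : ((el.toList.length / 2 : Nat) : Int) + 1 = ((el.toList.length / 2 + 1 : Nat) : Int) := by
      push_cast; ring
    rw [h1, PySem.List.slice_from _ (by positivity)]
    simp
    omega
  have hisin : PySem.Str.isIn "-" (PySem.Str.slice el none (some ((el.toList.length / 2 : Nat) : Int)))
      = PySem.Chars.isIn ['-'] (el.toList.take (el.toList.length / 2)) := by
    rw [PySem.Str.isIn_eq, hhalf]; rfl
  simp only [Bool.and_eq_true, decide_eq_true_eq, beq_iff_eq, Bool.not_eq_true',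
    PySem.Str.pyGet?_natCast, hisin, PySem.Chars.isIn_eq_false_iff, pv_singleton_infix_iff,
    Nat.cast_pos, ← String.toList_inj, hhalf, hsec]
  tauto

theorem pv_A_iff (el : String) : pvCheckA el = true ↔ pvShape el.toList := by
  unfold pvCheckA
  rw [PySem.Str.len_eq, pv_floordiv_two]
  -- extract the split result
  obtain ⟨datas, hsplit⟩ : ∃ datas, PySem.Str.split? el "-" = some datas := by
    cases h : PySem.Str.split? el "-" with
    | some d => exact ⟨d, rfl⟩
    | none =>
        have := PySem.Str.split?_map el "-"
        rw [h] at this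
        simp [PySem.Chars.split?] at this
  have hmap : datas.map String.toList = List.splitOnP (· == '-') el.toList := by
    have := PySem.Str.split?_map el "-"
    rw [hsplit] at this
    simp only [Option.map_some, PySem.Chars.split?] at this
    rw [← pv_splitOn_eq]
    simpa using this
  have hin : PySem.Str.isIn "-" el = true ↔ '-' ∈ el.toList := by
    rw [PySem.Str.isIn_eq]
    show PySem.Chars.isIn ['-'] el.toList = true ↔ _
    rw [PySem.Chars.isIn_iff_infix, pv_singleton_infix_iff]
  rw [hsplit]
  simp only [Option.getD_some]
  split
  · -- '-' not in el
    rename_i h1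
    simp only [Bool.not_eq_eq_eq_not, Bool.not_true] at h1
    constructor
    · intro h; cases h
    · rintro ⟨a, hne, hna, hcs⟩
      rw [(by rw [hin]; exact (by rw [hcs]; simp : '-' ∈ el.toList) : PySem.Str.isIn "-" el = true)] at h1
      cases h1
  · split
    · -- el == "-"
      rename_i h2
      constructor
      · intro h; cases h
      · rintro ⟨a, hne, hna, hcs⟩
        have : el.toList = ['-'] := by rw [beq_iff_eq] at h2; rw [h2]; rfl
        rw [this] at hcs
        have := congrArg List.length hcs
        simp at this
        have : a = [] := by
          cases a with | nil => rfl | cons _ _ => simp at this; omega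
        subst this
        simp at hcs
        exact absurd rfl hne
    · split
      · -- big condition fails
        rename_i h2 h3
        simp only [Bool.not_eq_eq_eq_not, Bool.not_true, Bool.and_eq_false_iff] at h3
        constructor
        · intro h; cases h
        · rintro ⟨a, hne, hna, hcs⟩
          exfalso
          have hpair : List.splitOnP (· == '-') el.toList = [a, a] :=
            (pv_splitOnP_pair_iff _ _ _).2 ⟨hcs, hna, hna⟩
          rw [hpair] at hmap
          obtain ⟨s0, s1, rfl⟩ : ∃ s0 s1, datas = [s0, s1] := by
            cases datas with
            | nil => simp at hmap
            | cons x xs =>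
                cases xs with
                | nil => simp at hmap
                | cons y ys =>
                    cases ys with
                    | nil => exact ⟨x, y, rfl⟩
                    | cons _ _ => simp at hmap
          simp only [List.map_cons, List.map_nil, List.cons.injEq, and_true] at hmap
          have hs01 : s0 = s1 := String.toList_inj.1 (hmap.1.trans hmap.2.symm)
          obtain ⟨hm1, hm2, hm3, hm4⟩ := pv_struct a
          rcases h3 with h3 | h3
          · rcases h3 with h3 | h3
            · simp at h3
            · rw [hs01] at h3; simp [PySem.List.pyGet?, PySem.List.pyIdx?] at h3
          · simp only [PySem.Str.pyGet?_natCast, hcs] at h3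
            rw [hm1] at h3
            simp at h3
      · rename_i h1 h2 h3
        simp only [Bool.not_eq_eq_eq_not, Bool.not_true, Bool.not_eq_false, Bool.and_eq_true,
          decide_eq_true_eq, beq_iff_eq] at h3
        obtain ⟨⟨hlen, hget⟩, hmid⟩ := h3
        refine ⟨fun _ => ?_, fun _ => rfl⟩
        obtain ⟨s0, s1, rfl⟩ := List.length_eq_two.1 hlen
        simp only [PySem.List.pyGet?, PySem.List.pyIdx?] at hget
        norm_num at hget
        subst hget
        have hmap' : List.splitOnP (· == '-') el.toList = [s0.toList, s0.toList] := by
          simpa using hmap.symm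
        obtain ⟨hcs, hna, -⟩ := (pv_splitOnP_pair_iff _ _ _).1 hmap'
        refine ⟨s0.toList, ?_, hna, hcs⟩
        intro hb
        rw [hb] at hcs
        simp only [List.nil_append] at hcs
        have : el = "-" := String.toList_inj.1 (by rw [hcs]; rfl)
        rw [beq_iff_eq] at h2
        exact h2 this

theorem pv_elem (el : String) : pvCheckA el = pvOkTwice el := by
  rw [Bool.eq_iff_iff, pv_A_iff, pv_B_iff]

theorem pv_total (strings : List String) :
    is_all_same_word_twice strings = is_all_same_word_twice_alt strings := by
  induction strings with
  | nil => rfl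
  | cons el rest ih =>
      rw [pv_stepA, pv_elem, ih]
      simp [is_all_same_word_twice_alt]

-- ===== VERDICT (by name: the statement is the Claim_ definition above) =====
theorem is_all_same_word_twice_spec : Claim_equal_is_all_same_word_twice := by
  intro strings _
  exact pv_total strings
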